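-- pv_equiv track=rewrite | github.com/aLexzzz430/Cognitive-OS | modules/world_model/canonical_state.py | _background_color
-- ===== SOURCE A (Python) =====
-- from typing import Any, Dict, List, Optional, Sequence, Tuple
--
-- Grid = List[List[int]]
--
-- def _background_color(grid: Grid) -> int:
--     counts: Dict[int, int] = {}
--     for row in grid:
--         for cell in row:
--             counts[int(cell)] = counts.get(int(cell), 0) + 1
--     if any(cell == 0 for row in grid for cell in row):
--         return 0
--     return max(counts.items(), key=lambda item: (item[1], -item[0]))[0] if counts else 0
-- ===== SOURCE B (Python) =====
-- # B: flatten + sort, then one linear run-scan over the sorted values; the longest run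
-- # (first-seen, i.e. smallest value on ties) is the background unless a raw zero exists.
-- def _background_color(grid):
--     vals = [int(c) for row in grid for c in row]
--     if not vals or any(c == 0 for row in grid for c in row):
--         return 0
--     vals.sort()
--     best_val, best_len = vals[0], 1
--     cur_val, cur_len = vals[0], 1
--     for v in vals[1:]:
--         if v == cur_val:
--             cur_len += 1
--         else:
--             cur_val, cur_len = v, 1
--         if cur_len > best_len:
--             best_val, best_len = cur_val, cur_len
--     return best_val
-- ===== Notes on version B (the rewrite author's own statement) =====
-- stated objective: alternative
-- what changed: Replaces the hash-map counting plus key-tuple max over dict items by flatten-sort and a single run-length scan of the sorted values (longest run, smallest value on ties).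
import Mathlib
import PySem

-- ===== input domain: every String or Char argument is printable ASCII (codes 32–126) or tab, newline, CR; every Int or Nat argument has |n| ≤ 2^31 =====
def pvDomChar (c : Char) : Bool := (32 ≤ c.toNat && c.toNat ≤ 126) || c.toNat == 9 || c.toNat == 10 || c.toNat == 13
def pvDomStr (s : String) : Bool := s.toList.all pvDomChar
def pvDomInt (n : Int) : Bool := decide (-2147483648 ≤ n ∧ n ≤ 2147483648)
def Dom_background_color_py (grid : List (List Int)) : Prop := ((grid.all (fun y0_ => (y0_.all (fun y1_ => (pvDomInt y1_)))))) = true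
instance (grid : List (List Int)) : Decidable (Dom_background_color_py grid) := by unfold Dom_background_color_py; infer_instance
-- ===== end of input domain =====

-- B replaces A's hash-map counting + tuple-key max over the dict items by flatten-sort and a
-- single run-length scan of the sorted values (alternative decomposition, not claimed faster).

-- ===== PORT A =====
-- literal port of A: build a count dict cell by cell; return 0 if any raw cell is 0,
-- else the key of max(counts.items(), key=item -> (item[1], -item[0])) (0 if the dict is empty)
def background_color_py (grid : List (List Int)) : Int :=
  let counts : PySem.Dict Int Int :=
    grid.foldl (fun d row => row.foldl (fun d cell => d.insert cell (d.getD cell 0 + 1)) d)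
      PySem.Dict.empty
  if grid.any (fun row => row.any (fun cell => cell == 0)) then 0
  else
    match PySem.List.max2? counts.items (fun it => it.2) (fun it => -it.1) with
    | some it => it.1
    | none => 0

-- ===== PORT B =====
-- one step of B's run-length scan; state is (best_val, best_len, cur_val, cur_len)
def bgStep (st : Int × Int × Int × Int) (v : Int) : Int × Int × Int × Int :=
  let cv' := if v == st.2.2.1 then st.2.2.1 else v
  let cl' := if v == st.2.2.1 then st.2.2.2 + 1 else 1
  if st.2.1 < cl' then (cv', cl', cv', cl') else (st.1, st.2.1, cv', cl')

def background_color_py_alt (grid : List (List Int)) : Int :=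
  let vals := grid.flatMap (fun row => row.map (fun c => c))
  if vals.isEmpty || grid.any (fun row => row.any (fun cell => cell == 0)) then 0
  else
    match PySem.List.sorted vals (fun v => v) with
    | [] => 0
    | v0 :: rest => (rest.foldl bgStep (v0, 1, v0, 1)).1

-- ===== PRECONDITION & SPEC =====
def Spec_background_color_py (grid : List (List Int)) (out : Int) : Prop := out = background_color_py_alt grid
instance (grid : List (List Int)) (out : Int) : Decidable (Spec_background_color_py grid out) := by unfold Spec_background_color_py; infer_instance

-- ===== CLAIM (what is proved, stated in full; the proofs are below) =====
def Claim_equal_background_color_py : Prop := ∀ (grid : List (List Int)), Dom_background_color_py grid → Spec_background_color_py grid (background_color_py grid)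

-- ===== LEMMAS AND PROOFS =====

-- the value both programs return on the non-zero branch: an element of l whose
-- (count, then smallest-value) pair is lexicographically maximal among the elements of l
def IsBest (l : List Int) (v : Int) : Prop :=
  v ∈ l ∧ ∀ w ∈ l, l.count w < l.count v ∨ (l.count w = l.count v ∧ v ≤ w)

lemma isBest_unique {l : List Int} {v w : Int} (hv : IsBest l v) (hw : IsBest l w) : v = w := by
  obtain ⟨hv1, hv2⟩ := hv; obtain ⟨hw1, hw2⟩ := hw
  rcases hv2 w hw1 with h | ⟨h1, h2⟩ <;> rcases hw2 v hv1 with h' | ⟨h1', h2'⟩ <;> omega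

lemma isBest_perm {l l' : List Int} (hp : l.Perm l') {v : Int} (h : IsBest l v) : IsBest l' v := by
  obtain ⟨h1, h2⟩ := h
  refine ⟨hp.mem_iff.mp h1, fun w hw => ?_⟩
  have := h2 w (hp.mem_iff.mpr hw)
  simpa [hp.count_eq] using this

-- A-side: the fold underlying PySem.List.max2? at A's two key functions
def mstep (acc : Option (Int × Int)) (x : Int × Int) : Option (Int × Int) :=
  match acc with
  | none => some x
  | some m => if (decide (m.2 < x.2) || !decide (x.2 < m.2) && decide (-m.1 < -x.1)) = true then some x else some m

lemma max2?_eq (xs : List (Int × Int)) :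
    PySem.List.max2? xs (fun it => it.2) (fun it => -it.1) = xs.foldl mstep none := by
  unfold PySem.List.max2? mstep
  congr 1
  funext acc x
  cases acc <;> simp

lemma mstep_eq (m x : Int × Int) :
    mstep (some m) x = if (m.2 < x.2 ∨ (¬ x.2 < m.2 ∧ -m.1 < -x.1)) then some x else some m := by
  show (if _ = true then some x else some m) = _
  by_cases h1 : m.2 < x.2 <;> by_cases h2 : x.2 < m.2 <;> by_cases h3 : -m.1 < -x.1 <;>
    simp [h1, h2, h3]

lemma mfold_some (xs : List (Int × Int)) : ∀ (m : Int × Int),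
    ∃ r, xs.foldl mstep (some m) = some r ∧ r ∈ m :: xs ∧
      ∀ y ∈ m :: xs, ¬ (r.2 < y.2 ∨ (¬ y.2 < r.2 ∧ -r.1 < -y.1)) := by
  induction xs with
  | nil =>
    intro m
    refine ⟨m, rfl, List.mem_singleton.mpr rfl, ?_⟩
    intro y hy
    rw [List.mem_singleton] at hy
    subst hy
    omega
  | cons x xs ih =>
    intro m
    by_cases hc : (m.2 < x.2 ∨ (¬ x.2 < m.2 ∧ -m.1 < -x.1))
    · obtain ⟨r, hr, hmem, hprop⟩ := ih x
      refine ⟨r, ?_, ?_, ?_⟩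
      · rw [List.foldl_cons, mstep_eq, if_pos hc]; exact hr
      · simp only [List.mem_cons] at hmem ⊢; tauto
      · intro y hy
        rcases List.mem_cons.mp hy with rfl | hy'
        · have h1 := hprop x List.mem_cons_self
          omega
        · exact hprop y hy'
    · obtain ⟨r, hr, hmem, hprop⟩ := ih m
      refine ⟨r, ?_, ?_, ?_⟩
      · rw [List.foldl_cons, mstep_eq, if_neg hc]; exact hr
      · simp only [List.mem_cons] at hmem ⊢; tauto
      · intro y hy
        rcases List.mem_cons.mp hy with rfl | hy'
        · exact hprop y List.mem_cons_self
        · rcases List.mem_cons.mp hy' with rfl | hy''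
          · have h1 := hprop m List.mem_cons_self
            omega
          · exact hprop y (List.mem_cons_of_mem _ hy'')

lemma mfold_spec (xs : List (Int × Int)) (hne : xs ≠ []) :
    ∃ r, xs.foldl mstep none = some r ∧ r ∈ xs ∧
      ∀ y ∈ xs, ¬ (r.2 < y.2 ∨ (¬ y.2 < r.2 ∧ -r.1 < -y.1)) := by
  cases xs with
  | nil => exact absurd rfl hne
  | cons x xs =>
    obtain ⟨r, hr, hmem, hprop⟩ := mfold_some xs x
    exact ⟨r, hr, hmem, hprop⟩

lemma count_append_singleton (p : List Int) (v a : Int) :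
    (p ++ [v]).count a = p.count a + (if a = v then 1 else 0) := by
  simp [List.count_append, List.count_singleton']
  split
  · simp_all
  · simp_all
    omega

-- B-side: the run-length scan over the sorted tail computes the IsBest element
lemma scan_spec (rest : List Int) : ∀ (p : List Int) (bv cv : Int),
    (∀ x ∈ p, ∀ y ∈ rest, x ≤ y) → rest.Pairwise (· ≤ ·) →
    cv ∈ p → (∀ x ∈ p, x ≤ cv) → bv ∈ p →
    (∀ x ∈ p, p.count x < p.count bv ∨ (p.count x = p.count bv ∧ bv ≤ x)) →
    IsBest (p ++ rest) (rest.foldl bgStep (bv, (p.count bv : Int), cv, (p.count cv : Int))).1 := by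
  induction rest with
  | nil =>
    intro p bv cv _ _ _ _ hbv hbest
    simpa [IsBest] using ⟨hbv, hbest⟩
  | cons v rest' ih =>
    intro p bv cv hord hpw hcv hcvmax hbv hbest
    have hvp : ∀ x ∈ p, x ≤ v := fun x hx => hord x hx v List.mem_cons_self
    have hvr : ∀ y ∈ rest', v ≤ y := (List.pairwise_cons.mp hpw).1
    have hpw' : rest'.Pairwise (· ≤ ·) := (List.pairwise_cons.mp hpw).2
    have hord' : ∀ x ∈ p ++ [v], ∀ y ∈ rest', x ≤ y := by
      intro x hx y hy
      rcases List.mem_append.mp hx with h | h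
      · exact hord x h y (List.mem_cons_of_mem _ hy)
      · rw [List.mem_singleton] at h; subst h; exact hvr y hy
    have hgoal_eq : p ++ v :: rest' = (p ++ [v]) ++ rest' := by simp
    rw [List.foldl_cons]
    by_cases hv : v = cv
    · subst hv
      have hstep : bgStep (bv, (p.count bv : Int), v, (p.count v : Int)) v =
          if (p.count bv : Int) < (p.count v : Int) + 1
          then (v, (p.count v : Int) + 1, v, (p.count v : Int) + 1)
          else (bv, (p.count bv : Int), v, (p.count v : Int) + 1) := by
        simp [bgStep]
      have hcnt_v : ((p ++ [v]).count v : Int) = (p.count v : Int) + 1 := by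
        rw [count_append_singleton]; simp
      by_cases htake : (p.count bv : Int) < (p.count v : Int) + 1
      · have hcc : p.count v = p.count bv := by
          rcases hbest v hcv with h | ⟨h, _⟩ <;> omega
        rw [hstep, if_pos htake, hgoal_eq]
        have := ih (p ++ [v]) v v hord' hpw'
          (List.mem_append_right _ (List.mem_singleton.mpr rfl))
          (by intro x hx
              rcases List.mem_append.mp hx with h | h
              · exact hvp x h
              · rw [List.mem_singleton] at h; subst h; exact le_refl _)
          (List.mem_append_right _ (List.mem_singleton.mpr rfl))
          (by intro x hx
              by_cases hxv : x = v
              · rw [hxv]; right; exact ⟨rfl, le_refl _⟩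
              · left
                rcases List.mem_append.mp hx with h | h
                · have h1 := hbest x h
                  rw [count_append_singleton, count_append_singleton, if_neg hxv, if_pos rfl]
                  omega
                · rw [List.mem_singleton] at h; exact absurd h hxv)
        rw [hcnt_v] at this
        exact this
      · have hlt : p.count v < p.count bv := by omega
        have hbvne : bv ≠ v := by intro h; subst h; omega
        rw [hstep, if_neg htake, hgoal_eq]
        have hcnt_bv : ((p ++ [v]).count bv : Int) = (p.count bv : Int) := by
          rw [count_append_singleton, if_neg hbvne]; simp
        have := ih (p ++ [v]) bv v hord' hpw'
          (List.mem_append_right _ (List.mem_singleton.mpr rfl))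
          (by intro x hx
              rcases List.mem_append.mp hx with h | h
              · exact hvp x h
              · rw [List.mem_singleton] at h; subst h; exact le_refl _)
          (List.mem_append_left _ hbv)
          (by intro x hx
              by_cases hxv : x = v
              · rw [hxv]
                rw [count_append_singleton, count_append_singleton, if_pos rfl, if_neg hbvne]
                by_cases he : p.count v + 1 = p.count bv
                · right; exact ⟨by omega, hcvmax bv hbv⟩
                · left; omega
              · rcases List.mem_append.mp hx with h | h
                · have h1 := hbest x h
                  rw [count_append_singleton, count_append_singleton, if_neg hxv, if_neg hbvne]
                  rcases h1 with h1 | ⟨h1, h2⟩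
                  · left; omega
                  · right; exact ⟨by omega, h2⟩
                · rw [List.mem_singleton] at h; exact absurd h hxv)
        rw [hcnt_v, hcnt_bv] at this
        exact this
    · have hcvlt : cv < v := lt_of_le_of_ne (hvp cv hcv) (Ne.symm hv)
      have hvnotp : v ∉ p := fun h => absurd (hcvmax v h) (not_le.mpr hcvlt)
      have hbvne : bv ≠ v := fun h => hvnotp (h ▸ hbv)
      have hcp : 0 < p.count bv := List.count_pos_iff.mpr hbv
      have hstep : bgStep (bv, (p.count bv : Int), cv, (p.count cv : Int)) v =
          (bv, (p.count bv : Int), v, 1) := by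
        have hne : (v == cv) = false := by simp [hv]
        simp [bgStep, hne]
        intro h
        omega
      rw [hstep, hgoal_eq]
      have hcnt_v : ((p ++ [v]).count v : Int) = 1 := by
        rw [count_append_singleton, if_pos rfl, List.count_eq_zero_of_not_mem hvnotp]
        simp
      have hcnt_bv : ((p ++ [v]).count bv : Int) = (p.count bv : Int) := by
        rw [count_append_singleton, if_neg hbvne]; simp
      have := ih (p ++ [v]) bv v hord' hpw'
        (List.mem_append_right _ (List.mem_singleton.mpr rfl))
        (by intro x hx
            rcases List.mem_append.mp hx with h | h
            · exact le_of_lt (lt_of_le_of_lt (hcvmax x h) hcvlt)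
            · rw [List.mem_singleton] at h; subst h; exact le_refl _)
        (List.mem_append_left _ hbv)
        (by intro x hx
            by_cases hxv : x = v
            · rw [hxv]
              rw [count_append_singleton, count_append_singleton, if_pos rfl, if_neg hbvne,
                List.count_eq_zero_of_not_mem hvnotp]
              by_cases he : 0 + 1 = p.count bv
              · right; exact ⟨by omega, le_of_lt (lt_of_le_of_lt (hcvmax bv hbv) hcvlt)⟩
              · left; omega
            · rcases List.mem_append.mp hx with h | h
              · have h1 := hbest x h
                rw [count_append_singleton, count_append_singleton, if_neg hxv, if_neg hbvne]
                rcases h1 with h1 | ⟨h1, h2⟩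
                · left; omega
                · right; exact ⟨by omega, h2⟩
              · rw [List.mem_singleton] at h; exact absurd h hxv)
      rw [hcnt_v, hcnt_bv] at this
      exact this

lemma counts_eq (grid : List (List Int)) :
    grid.foldl (fun d row => row.foldl (fun d cell => d.insert cell (d.getD cell 0 + 1)) d)
      PySem.Dict.empty = PySem.Dict.counter grid.flatten := by
  rw [← List.foldl_flatten]
  exact PySem.Dict.foldl_insert_getD_add_one_eq_counter _

lemma A_isBest (grid : List (List Int)) (hne : grid.flatten ≠ [])
    (hz : grid.any (fun row => row.any (fun cell => cell == 0)) = false) :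
    IsBest grid.flatten (background_color_py grid) := by
  have hitems : (PySem.Dict.counter grid.flatten).items
      = (PySem.Set.ofList grid.flatten).map (fun k => (k, (grid.flatten.count k : Int))) :=
    PySem.Dict.items_counter _
  have hine : (PySem.Dict.counter grid.flatten).items ≠ [] := by
    rw [hitems]
    cases hfl : grid.flatten with
    | nil => exact absurd hfl hne
    | cons a t =>
      intro h
      have ha : a ∈ PySem.Set.ofList (a :: t) :=
        (PySem.Set.mem_ofList _ _).mpr List.mem_cons_self
      rw [List.map_eq_nil_iff.mp h] at ha
      exact absurd ha List.not_mem_nil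
  obtain ⟨r, hr, hmem, hprop⟩ := mfold_spec _ hine
  have hres : background_color_py grid = r.1 := by
    simp only [background_color_py, counts_eq, hz, Bool.false_eq_true, if_false, max2?_eq, hr]
  rw [hres]
  rw [hitems] at hmem hprop
  obtain ⟨k, hk, rfl⟩ := List.mem_map.mp hmem
  refine ⟨(PySem.Set.mem_ofList _ _).mp hk, fun w hw => ?_⟩
  have hy := hprop (w, (grid.flatten.count w : Int))
    (List.mem_map.mpr ⟨w, (PySem.Set.mem_ofList _ _).mpr hw, rfl⟩)
  push Not at hy
  simp only at hy ⊢
  omega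

lemma B_isBest (grid : List (List Int)) (hne : grid.flatten ≠ [])
    (hz : grid.any (fun row => row.any (fun cell => cell == 0)) = false) :
    IsBest grid.flatten (background_color_py_alt grid) := by
  have hvals : grid.flatMap (fun row => row.map (fun c => c)) = grid.flatten := by simp
  have hperm : (PySem.List.sorted grid.flatten (fun v => v)).Perm grid.flatten :=
    PySem.List.sorted_perm _ _ _
  have hpair : (PySem.List.sorted grid.flatten (fun v => v)).Pairwise (· ≤ ·) :=
    PySem.List.sorted_pairwise _ _
  have hsne : PySem.List.sorted grid.flatten (fun v => v) ≠ [] := by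
    intro h
    exact hne (List.Perm.eq_nil (h ▸ hperm).symm)
  cases hs : PySem.List.sorted grid.flatten (fun v => v) with
  | nil => exact absurd hs hsne
  | cons v0 rest =>
    rw [hs] at hperm hpair
    have hemp : grid.flatten.isEmpty = false := by
      simp only [List.isEmpty_eq_false_iff]; exact hne
    have hres : background_color_py_alt grid = (rest.foldl bgStep (v0, 1, v0, 1)).1 := by
      simp only [background_color_py_alt, hvals, hz, Bool.or_false, hemp,
        Bool.false_eq_true, if_false, hs]
    rw [hres]
    have hc1 : (([v0] : List Int).count v0 : Int) = 1 := by simp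
    have := scan_spec rest [v0] v0 v0
      (fun x hx y hy => by
        rw [List.mem_singleton] at hx; subst hx
        exact (List.pairwise_cons.mp hpair).1 y hy)
      (List.pairwise_cons.mp hpair).2
      (List.mem_singleton.mpr rfl)
      (fun x hx => by rw [List.mem_singleton] at hx; subst hx; exact le_refl _)
      (List.mem_singleton.mpr rfl)
      (fun x hx => by rw [List.mem_singleton] at hx; subst hx; right; exact ⟨rfl, le_refl _⟩)
    rw [hc1] at this
    exact isBest_perm (by simpa using hperm) this

-- ===== VERDICT (by name: the statement is the Claim_ definition above) =====
theorem background_color_py_spec : Claim_equal_background_color_py := by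
  intro grid _
  show background_color_py grid = background_color_py_alt grid
  by_cases hz : grid.any (fun row => row.any (fun cell => cell == 0)) = true
  · simp [background_color_py, background_color_py_alt, hz]
  · rw [Bool.not_eq_true] at hz
    rcases eq_or_ne grid.flatten [] with hfe | hfe
    · have hvals : grid.flatMap (fun row => row.map (fun c => c)) = grid.flatten := by simp
      have hA : background_color_py grid = 0 := by
        simp [background_color_py, counts_eq, hz, hfe, max2?_eq, PySem.Dict.items_counter,
          PySem.Set.ofList]
      have hB : background_color_py_alt grid = 0 := by
        simp [background_color_py_alt, hfe]
      rw [hA, hB]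
    · exact isBest_unique (A_isBest grid hfe hz) (B_isBest grid hfe hz)
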